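-- pv_equiv track=rewrite | github.com/rdwj/greploom | src/greploom/search/budget.py | _fence
-- ===== SOURCE A (Python) =====
-- def _fence(text: str) -> str:
--     """Return a backtick fence long enough to not collide with content."""
--     longest = 0
--     run = 0
--     for ch in text:
--         if ch == "`":
--             run += 1
--             longest = max(longest, run)
--         else:
--             run = 0
--     return "`" * max(3, longest + 1)
-- ===== SOURCE B (Python) =====
-- def _fence(text: str) -> str:
--     """Return a backtick fence long enough to not collide with content."""
--     n = 3
--     while "`" * n in text:
--         n += 1
--     return "`" * n
-- ===== Notes on version B (the rewrite author's own statement) =====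
-- stated objective: faster
-- what changed: B drops the per-character running tally entirely and instead probes candidate fences directly: starting at length 3, it grows the candidate while it still occurs as a substring of the text.
import Mathlib
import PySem

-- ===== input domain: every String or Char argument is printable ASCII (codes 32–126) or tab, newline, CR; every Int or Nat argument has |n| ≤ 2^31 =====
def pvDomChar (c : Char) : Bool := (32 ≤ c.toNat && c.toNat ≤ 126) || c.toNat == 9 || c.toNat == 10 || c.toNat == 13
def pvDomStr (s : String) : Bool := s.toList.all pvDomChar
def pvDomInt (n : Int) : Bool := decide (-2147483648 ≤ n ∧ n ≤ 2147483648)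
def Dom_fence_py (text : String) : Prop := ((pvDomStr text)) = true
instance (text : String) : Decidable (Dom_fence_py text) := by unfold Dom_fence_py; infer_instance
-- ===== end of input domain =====

-- B replaces A's per-character running tally by direct probing: starting at length 3, it
-- grows the candidate fence while it still occurs as a substring of the text (measured faster).

-- ===== PORT A =====
-- the loop body of A: run += 1; longest = max(longest, run)  /  run = 0
def fenceStep (st : Int × Int) (ch : Char) : Int × Int :=
  if ch = '`' then (max st.1 (st.2 + 1), st.2 + 1) else (st.1, 0)

def fence_py (text : String) : String :=
  let st := text.toList.foldl fenceStep (0, 0)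
  String.ofList (List.replicate (max 3 (st.1 + 1)).toNat '`')

-- ===== PORT B =====
-- termination fact for B's while loop: if '`'*n occurs in cs then n ≤ cs.length
theorem fence_isIn_le (cs : List Char) (n : Nat)
    (h : PySem.Chars.isIn (List.replicate n '`') cs = true) : n ≤ cs.length := by
  have := (PySem.Chars.isIn_iff_infix (List.replicate n '`') cs).mp h
  simpa using this.length_le

-- while "`" * n in text: n += 1
def fenceLoop (cs : List Char) (n : Nat) : Nat :=
  if h : PySem.Chars.isIn (List.replicate n '`') cs = true then fenceLoop cs (n + 1) else n
termination_by cs.length + 1 - n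
decreasing_by have := fence_isIn_le cs n h; omega

def fence_py_alt (text : String) : String :=
  String.ofList (List.replicate (fenceLoop text.toList 3) '`')

-- ===== PRECONDITION & SPEC =====
def Spec_fence_py (text : String) (out : String) : Prop := out = fence_py_alt text
instance (text : String) (out : String) : Decidable (Spec_fence_py text out) := by unfold Spec_fence_py; infer_instance

-- ===== CLAIM (what is proved, stated in full; the proofs are below) =====
def Claim_equal_fence_py : Prop := ∀ (text : String), Dom_fence_py text → Spec_fence_py text (fence_py text)

-- ===== LEMMAS AND PROOFS =====

-- Nat version of A's fold state (A's tallies never go negative)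
def fenceStepN (st : Nat × Nat) (ch : Char) : Nat × Nat :=
  if ch = '`' then (max st.1 (st.2 + 1), st.2 + 1) else (st.1, 0)

theorem fold_int_eq_nat (cs : List Char) : ∀ (l r : Nat),
    cs.foldl fenceStep ((l : Int), (r : Int)) =
      (((cs.foldl fenceStepN (l, r)).1 : Int), ((cs.foldl fenceStepN (l, r)).2 : Int)) := by
  induction cs with
  | nil => intro l r; simp
  | cons c cs ih =>
      intro l r
      by_cases h : c = '`' <;>
        simp only [List.foldl_cons, fenceStep, fenceStepN, h, if_pos,
          reduceIte]
      · have := ih (max l (r + 1)) (r + 1)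
        push_cast at this ⊢
        exact this
      · have := ih l 0
        push_cast at this ⊢
        exact this

-- the fold's longest-so-far never decreases
theorem fold_mono (cs : List Char) : ∀ (st : Nat × Nat),
    st.1 ≤ (cs.foldl fenceStepN st).1 := by
  induction cs with
  | nil => intro st; simp
  | cons c cs ih =>
      intro st
      refine le_trans ?_ (ih (fenceStepN st c))
      by_cases h : c = '`' <;> simp [fenceStepN, h]

-- folding over a positive run of backticks
theorem fold_replicate (n : Nat) (hn : 1 ≤ n) : ∀ (st : Nat × Nat),
    (List.replicate n '`').foldl fenceStepN st = (max st.1 (st.2 + n), st.2 + n) := by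
  induction n with
  | zero => omega
  | succ m ih =>
      intro st
      rcases Nat.eq_zero_or_pos m with hm | hm
      · subst hm; simp [fenceStepN]
      · have := ih hm (fenceStepN st '`')
        rw [List.replicate_succ, List.foldl_cons, this]
        simp only [fenceStepN, reduceIte, Prod.mk.injEq]
        omega

-- (b) every backtick run in cs is counted by the fold
theorem infix_le_fold (cs : List Char) (n : Nat)
    (h : List.replicate n '`' <:+: cs) : n ≤ (cs.foldl fenceStepN (0, 0)).1 := by
  rcases Nat.eq_zero_or_pos n with hn | hn
  · omega
  · obtain ⟨pre, post, rfl⟩ := h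
    rw [List.foldl_append, List.foldl_append, fold_replicate n hn]
    refine le_trans ?_ (fold_mono post _)
    simp

-- (a) the fold's result is realised by an actual run (and the current run is a suffix)
theorem fold_realised (cs : List Char) :
    List.replicate (cs.foldl fenceStepN (0, 0)).1 '`' <:+: cs ∧
      List.replicate (cs.foldl fenceStepN (0, 0)).2 '`' <:+ cs := by
  induction cs using List.reverseRecOn with
  | nil => simp
  | append_singleton cs c ih =>
      obtain ⟨ih1, ih2⟩ := ih
      rw [List.foldl_append]
      by_cases h : c = '`'
      · subst h
        simp only [List.foldl_cons, List.foldl_nil, fenceStepN]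
        have hsuf : List.replicate ((cs.foldl fenceStepN (0, 0)).2 + 1) '`' <:+ cs ++ ['`'] := by
          rw [List.replicate_succ']
          obtain ⟨t, ht⟩ := ih2
          exact ⟨t, by rw [← List.append_assoc, ht]⟩
        constructor
        · rcases max_cases (cs.foldl fenceStepN (0, 0)).1 ((cs.foldl fenceStepN (0, 0)).2 + 1) with
            ⟨he, _⟩ | ⟨he, _⟩
          · rw [he]; exact ih1.trans ⟨[], ['`'], by simp⟩
          · rw [he]; exact hsuf.isInfix
        · exact hsuf
      · simp only [List.foldl_cons, List.foldl_nil, fenceStepN, if_neg h]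
        exact ⟨ih1.trans ⟨[], [c], by simp⟩, by simp⟩

-- characterisation of B's while loop
theorem fenceLoop_eq (cs : List Char) (L : Nat)
    (hL : L = (cs.foldl fenceStepN (0, 0)).1) :
    ∀ n, fenceLoop cs n = max n (L + 1) := by
  intro n
  by_cases hn : n ≤ L
  · -- replicate n is a prefix of the realised run, hence in cs: loop continues
    have hin : PySem.Chars.isIn (List.replicate n '`') cs = true := by
      rw [PySem.Chars.isIn_iff_infix]
      have hpre : List.replicate n '`' <+: List.replicate (cs.foldl fenceStepN (0, 0)).1 '`' :=
        ⟨List.replicate ((cs.foldl fenceStepN (0, 0)).1 - n) '`', by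
          rw [← List.replicate_add]; congr 1; omega⟩
      exact hpre.isInfix.trans (fold_realised cs).1
    rw [fenceLoop, dif_pos hin]
    have := fenceLoop_eq cs L hL (n + 1)
    omega
  · have hout : ¬ PySem.Chars.isIn (List.replicate n '`') cs = true := by
      intro h
      exact hn (le_trans (infix_le_fold cs n ((PySem.Chars.isIn_iff_infix _ _).mp h)) (hL ▸ le_refl _))
    rw [fenceLoop, dif_neg hout]
    omega
termination_by n => L + 1 - n
decreasing_by omega

-- ===== VERDICT (by name: the statement is the Claim_ definition above) =====
theorem fence_py_spec : Claim_equal_fence_py := by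
  intro text _
  have hb := fold_int_eq_nat text.toList 0 0
  simp only [Nat.cast_zero] at hb
  have h : (max 3 ((List.foldl fenceStepN (0, 0) text.toList).1 + 1 : Int)).toNat
      = max 3 ((List.foldl fenceStepN (0, 0) text.toList).1 + 1) := by
    omega
  simp only [Spec_fence_py, fence_py, fence_py_alt, hb,
    fenceLoop_eq text.toList _ rfl 3, h]
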